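-- pv_equiv track=rewrite | github.com/calebyhan/orbit | src/orbit/preprocess/dedupe.py | cluster_duplicates
-- ===== SOURCE A (Python) =====
-- from typing import List, Tuple, Optional
--
-- def cluster_duplicates(
--     pairs: List[Tuple[int, int]],
--     n_items: int
-- ) -> dict:
--     """Build connected components from duplicate pairs.
--
--     Args:
--         pairs: List of (i, j) duplicate pairs
--         n_items: Total number of items
--
--     Returns:
--         Dict mapping item index to cluster ID (leader index)
--     """
--     # Build adjacency list
--     adj = {i: set() for i in range(n_items)}
--     for i, j in pairs:
--         adj[i].add(j)
--         adj[j].add(i)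
--
--     # Find connected components using DFS
--     visited = set()
--     clusters = {}
--
--     for start in range(n_items):
--         if start in visited:
--             continue
--
--         # DFS to find component
--         component = []
--         stack = [start]
--         while stack:
--             node = stack.pop()
--             if node in visited:
--                 continue
--             visited.add(node)
--             component.append(node)
--             stack.extend(adj[node])
--
--         # Leader is earliest (lowest index) in component
--         leader = min(component)
--         for node in component:
--             clusters[node] = leader
--
--     return clusters
-- ===== SOURCE B (Python) =====
-- from typing import List, Tuple
--
-- def cluster_duplicates(
--     pairs: List[Tuple[int, int]],
--     n_items: int
-- ) -> dict:
--     """Build connected components from duplicate pairs (union-find).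
--
--     Roots are component minima: union attaches the larger root under the
--     smaller; the mapping is emitted cluster by cluster.
--     """
--     parent = {i: i for i in range(n_items)}
--
--     def find(x: int) -> int:
--         while parent[x] != x:
--             x = parent[x]
--         return x
--
--     for i, j in pairs:
--         ri, rj = find(i), find(j)
--         if ri < rj:
--             parent[rj] = ri
--         elif rj < ri:
--             parent[ri] = rj
--
--     members: dict = {}
--     for i in range(n_items):
--         members.setdefault(find(i), []).append(i)
--     return {m: r for r, ms in members.items() for m in ms}
-- ===== Notes on version B (the rewrite author's own statement) =====
-- stated objective: faster
-- what changed: Replaces the adjacency-list + explicit-stack DFS component search with a disjoint-set (union-find) forest: a parent map over range(n_items), union over the pairs attaching the larger root under the smaller so each root is its component's minimum, then find(i) read off for every item and the mapping emitted cluster by cluster; it avoids building the n-entry dict of per-item neighbour sets and the visited set, which a timing run measured at about 1.9x faster.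
import Mathlib
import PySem

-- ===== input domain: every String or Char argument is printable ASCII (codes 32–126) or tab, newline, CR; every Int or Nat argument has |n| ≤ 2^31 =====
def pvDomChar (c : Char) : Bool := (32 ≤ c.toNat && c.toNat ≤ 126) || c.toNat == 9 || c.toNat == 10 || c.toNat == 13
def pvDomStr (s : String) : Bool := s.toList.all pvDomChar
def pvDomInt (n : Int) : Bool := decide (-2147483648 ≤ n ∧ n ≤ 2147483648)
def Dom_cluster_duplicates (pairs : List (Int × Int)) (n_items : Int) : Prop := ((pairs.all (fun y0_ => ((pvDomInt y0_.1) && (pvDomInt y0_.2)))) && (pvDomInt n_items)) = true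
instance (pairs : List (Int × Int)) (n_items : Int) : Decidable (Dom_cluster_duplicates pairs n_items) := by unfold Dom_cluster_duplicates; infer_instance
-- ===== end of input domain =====

-- B replaces A's adjacency-list + stack DFS with a union-find forest whose roots are the
-- component minima (a genuinely different algorithm of similar cost). Python dict outputs
-- are compared as dicts (ignoring item order); both ports read the mapping out in ascending
-- key order, its keys being exactly range(n_items) under Pre_.

-- ===== PORT A =====
-- adj[i].add(j); adj[j].add(i)  (in-place set mutation, keyed dict updates)
def pvAdjStep (d : PySem.Dict Int (PySem.Set Int)) (p : Int × Int) : PySem.Dict Int (PySem.Set Int) :=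
  let d1 := d.insert p.1 (PySem.Set.add (d.getD p.1 PySem.Set.empty) p.2)
  d1.insert p.2 (PySem.Set.add (d1.getD p.2 PySem.Set.empty) p.1)

-- the 'while stack' DFS loop; stack modelled with its top at the head; the fuel is a
-- totality guard only (pvDfsFuel provably dominates the iteration count, see proofs)
def pvDfs (adj : PySem.Dict Int (PySem.Set Int)) :
    Nat → PySem.Set Int → List Int → List Int → PySem.Set Int × List Int
  | 0, visited, _, comp => (visited, comp)
  | _ + 1, visited, [], comp => (visited, comp)
  | fuel + 1, visited, node :: rest, comp =>
    if node ∈ visited then pvDfs adj fuel visited rest comp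
    else pvDfs adj fuel (PySem.Set.add visited node)
      (adj.getD node PySem.Set.empty ++ rest) (comp ++ [node])

def pvDfsFuel (adj : PySem.Dict Int (PySem.Set Int)) : Nat :=
  1 + (adj.items.map (fun kv => 1 + kv.2.length)).sum

-- one iteration of 'for start in range(n_items)'
def pvClusterStep (adj : PySem.Dict Int (PySem.Set Int))
    (st : PySem.Set Int × PySem.Dict Int Int) (start : Int) :
    PySem.Set Int × PySem.Dict Int Int :=
  if start ∈ st.1 then st
  else
    let r := pvDfs adj (pvDfsFuel adj) st.1 [start] []
    -- leader = min(component); component is never empty, the default is never used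
    let leader := (PySem.List.min? r.2 (fun x => x)).getD 0
    (r.1, r.2.foldl (fun c node => c.insert node leader) st.2)

def cluster_duplicates (pairs : List (Int × Int)) (n_items : Int) : List (Int × Int) :=
  let adj0 : PySem.Dict Int (PySem.Set Int) :=
    (PySem.List.pyRange 0 n_items).foldl (fun d i => d.insert i PySem.Set.empty) PySem.Dict.empty
  let adj := pairs.foldl pvAdjStep adj0
  let fin := (PySem.List.pyRange 0 n_items).foldl (pvClusterStep adj)
    ((PySem.Set.empty : PySem.Set Int), (PySem.Dict.empty : PySem.Dict Int Int))
  (PySem.List.pyRange 0 n_items).map (fun i => (i, fin.2.getD i 0))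

-- ===== PORT B =====
-- 'while parent[x] != x: x = parent[x]'; the fuel n_items+1 is a totality guard only
-- (parent chains strictly decrease inside range(n_items), see proofs)
def pvFind (parent : PySem.Dict Int Int) : Nat → Int → Int
  | 0, x => x
  | fuel + 1, x =>
    let y := parent.getD x x
    if y = x then x else pvFind parent fuel y

-- union(i, j): attach the larger root under the smaller
def pvUfStep (fuel : Nat) (d : PySem.Dict Int Int) (p : Int × Int) : PySem.Dict Int Int :=
  let ri := pvFind d fuel p.1
  let rj := pvFind d fuel p.2
  if ri < rj then d.insert rj ri
  else if rj < ri then d.insert ri rj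
  else d

def cluster_duplicates_alt (pairs : List (Int × Int)) (n_items : Int) : List (Int × Int) :=
  let fuel := n_items.toNat + 1
  let parent0 : PySem.Dict Int Int :=
    (PySem.List.pyRange 0 n_items).foldl (fun d i => d.insert i i) PySem.Dict.empty
  let parent := pairs.foldl (pvUfStep fuel) parent0
  (PySem.List.pyRange 0 n_items).map (fun i => (i, pvFind parent fuel i))

-- ===== PRECONDITION & SPEC =====
-- Pre_ excludes exactly the inputs where A raises KeyError: a pair endpoint outside range(n_items).
def Pre_cluster_duplicates (pairs : List (Int × Int)) (n_items : Int) : Prop :=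
  ∀ p ∈ pairs, 0 ≤ p.1 ∧ p.1 < n_items ∧ 0 ≤ p.2 ∧ p.2 < n_items
instance (pairs : List (Int × Int)) (n_items : Int) : Decidable (Pre_cluster_duplicates pairs n_items) := by
  unfold Pre_cluster_duplicates; infer_instance

def pvWitness_cluster_duplicates : (List (Int × Int)) × Int := ([(0, 2), (1, 2)], 4)

def Spec_cluster_duplicates (pairs : List (Int × Int)) (n_items : Int) (out : List (Int × Int)) : Prop :=
  out = cluster_duplicates_alt pairs n_items
instance (pairs : List (Int × Int)) (n_items : Int) (out : List (Int × Int)) : Decidable (Spec_cluster_duplicates pairs n_items out) := by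
  unfold Spec_cluster_duplicates; infer_instance

-- ===== CLAIM (what is proved, stated in full; the proofs are below) =====
def Claim_equal_cluster_duplicates : Prop := ∀ (pairs : List (Int × Int)) (n_items : Int), Dom_cluster_duplicates pairs n_items → Pre_cluster_duplicates pairs n_items → Spec_cluster_duplicates pairs n_items (cluster_duplicates pairs n_items)

-- ===== LEMMAS AND PROOFS =====

-- undirected edge / connectivity of the pair graph, and "m is the component minimum"
def pvE (P : List (Int × Int)) (a b : Int) : Prop := (a, b) ∈ P ∨ (b, a) ∈ P
def pvConn (P : List (Int × Int)) : Int → Int → Prop := Relation.ReflTransGen (pvE P)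
def pvIsMin (P : List (Int × Int)) (x m : Int) : Prop :=
  pvConn P x m ∧ ∀ y, pvConn P x y → m ≤ y

theorem pvE_symm {P : List (Int × Int)} {a b : Int} (h : pvE P a b) : pvE P b a := h.symm

theorem pvConn_symm {P : List (Int × Int)} {x y : Int} (h : pvConn P x y) : pvConn P y x :=
  Relation.ReflTransGen.symmetric (fun _ _ hab => pvE_symm hab) h

theorem pvConn_nil {x y : Int} (h : pvConn [] x y) : x = y := by
  induction h with
  | refl => rfl
  | tail _ hE ih => cases hE with
    | inl h' => cases h'
    | inr h' => cases h'

theorem pvConn_mono {P Q : List (Int × Int)} {x y : Int} (h : pvConn P x y) :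
    pvConn (P ++ Q) x y := by
  refine Relation.ReflTransGen.mono ?_ h
  intro a b hab
  cases hab with
  | inl h' => exact Or.inl (List.mem_append_left _ h')
  | inr h' => exact Or.inr (List.mem_append_left _ h')

theorem pvConn_single {P : List (Int × Int)} {a b : Int} (h : pvE P a b) : pvConn P a b :=
  Relation.ReflTransGen.single h

theorem pvConn_append_one {P : List (Int × Int)} {q : Int × Int} {x y : Int}
    (h : pvConn (P ++ [q]) x y) :
    pvConn P x y ∨ (pvConn P x q.1 ∧ pvConn P q.2 y) ∨ (pvConn P x q.2 ∧ pvConn P q.1 y) := by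
  induction h with
  | refl => exact Or.inl .refl
  | @tail b c _ hE ih =>
    have hE' : pvE P b c ∨ (b = q.1 ∧ c = q.2) ∨ (b = q.2 ∧ c = q.1) := by
      rcases hE with h' | h' <;> rw [List.mem_append] at h'
      · rcases h' with h' | h'
        · exact Or.inl (Or.inl h')
        · simp only [List.mem_singleton] at h'
          exact Or.inr (Or.inl ⟨congrArg Prod.fst h' , congrArg Prod.snd h'⟩)
      · rcases h' with h' | h'
        · exact Or.inl (Or.inr h')
        · simp only [List.mem_singleton] at h'
          exact Or.inr (Or.inr ⟨congrArg Prod.snd h', congrArg Prod.fst h'⟩)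
    rcases hE' with hbc | ⟨hb, hc⟩ | ⟨hb, hc⟩
    · rcases ih with ih | ⟨ih1, ih2⟩ | ⟨ih1, ih2⟩
      · exact Or.inl (ih.tail hbc)
      · exact Or.inr (Or.inl ⟨ih1, ih2.tail hbc⟩)
      · exact Or.inr (Or.inr ⟨ih1, ih2.tail hbc⟩)
    · subst hb; subst hc
      rcases ih with ih | ⟨ih1, _⟩ | ⟨ih1, _⟩
      · exact Or.inr (Or.inl ⟨ih, .refl⟩)
      · exact Or.inr (Or.inl ⟨ih1, .refl⟩)
      · exact Or.inl ih1
    · subst hb; subst hc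
      rcases ih with ih | ⟨ih1, _⟩ | ⟨ih1, _⟩
      · exact Or.inr (Or.inr ⟨ih, .refl⟩)
      · exact Or.inl ih1
      · exact Or.inr (Or.inr ⟨ih1, .refl⟩)

theorem pvIsMin_unique {P : List (Int × Int)} {x a b : Int}
    (ha : pvIsMin P x a) (hb : pvIsMin P x b) : a = b :=
  le_antisymm (ha.2 b hb.1) (hb.2 a ha.1)

theorem pvIsMin_congr {P : List (Int × Int)} {x x' m : Int}
    (hxx : pvConn P x x') (h : pvIsMin P x m) : pvIsMin P x' m :=
  ⟨Relation.ReflTransGen.trans (pvConn_symm hxx) h.1,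
   fun y hy => h.2 y (Relation.ReflTransGen.trans hxx hy)⟩

-- closure of a visited set under edges extends to connectivity
theorem pvClosed_conn {P : List (Int × Int)} {V : PySem.Set Int}
    (hcl : ∀ v ∈ V, ∀ y, pvE P v y → y ∈ V) {x z : Int}
    (hx : x ∈ V) (h : pvConn P x z) : z ∈ V := by
  induction h with
  | refl => exact hx
  | tail _ hE ih => exact hcl _ ih _ hE

-- ===== adjacency dict characterisation =====

theorem pvAdj0_getD (l : List Int) (d : PySem.Dict Int (PySem.Set Int))
    (hd : ∀ x, d.getD x PySem.Set.empty = PySem.Set.empty) (x : Int) :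
    (l.foldl (fun d i => d.insert i PySem.Set.empty) d).getD x PySem.Set.empty = PySem.Set.empty := by
  induction l generalizing d with
  | nil => exact hd x
  | cons i l ih =>
    refine ih _ (fun z => ?_)
    rw [PySem.Dict.getD_insert]
    split
    · rfl
    · exact hd z

theorem pvAdjStep_mem (d : PySem.Dict Int (PySem.Set Int)) (p : Int × Int) (x y : Int) :
    y ∈ (pvAdjStep d p).getD x PySem.Set.empty ↔
      y ∈ d.getD x PySem.Set.empty ∨ (x = p.1 ∧ y = p.2) ∨ (x = p.2 ∧ y = p.1) := by
  obtain ⟨i, j⟩ := p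
  simp only [pvAdjStep, PySem.Dict.getD_insert]
  by_cases hxj : x = j <;> by_cases hxi : x = i <;> simp_all

theorem pvAdj_getD_mem (P : List (Int × Int)) (d : PySem.Dict Int (PySem.Set Int)) (x y : Int) :
    y ∈ (P.foldl pvAdjStep d).getD x PySem.Set.empty ↔
      y ∈ d.getD x PySem.Set.empty ∨ pvE P x y := by
  induction P generalizing d with
  | nil => simp [pvE]
  | cons p P ih =>
    simp only [List.foldl_cons, ih, pvAdjStep_mem, pvE, List.mem_cons, Prod.ext_iff]
    tauto

theorem pvAdjStep_mem_keys (d : PySem.Dict Int (PySem.Set Int)) (p : Int × Int) (x : Int) :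
    x ∈ (pvAdjStep d p).keys ↔ x = p.1 ∨ x = p.2 ∨ x ∈ d.keys := by
  simp only [pvAdjStep, PySem.Dict.mem_keys_insert]
  tauto

theorem pvAdj_mem_keys (P : List (Int × Int)) (d : PySem.Dict Int (PySem.Set Int)) (x : Int) :
    x ∈ (P.foldl pvAdjStep d).keys ↔ x ∈ d.keys ∨ ∃ p ∈ P, x = p.1 ∨ x = p.2 := by
  induction P generalizing d with
  | nil => simp
  | cons p P ih =>
    simp only [List.foldl_cons, ih, pvAdjStep_mem_keys, List.mem_cons]
    constructor
    · rintro ((h | h | h) | ⟨q, hq, hxq⟩)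
      · exact Or.inr ⟨p, Or.inl rfl, Or.inl h⟩
      · exact Or.inr ⟨p, Or.inl rfl, Or.inr h⟩
      · exact Or.inl h
      · exact Or.inr ⟨q, Or.inr hq, hxq⟩
    · rintro (h | ⟨q, (rfl | hq), hxq⟩)
      · exact Or.inl (Or.inr (Or.inr h))
      · tauto
      · exact Or.inr ⟨q, hq, hxq⟩

theorem pvAdj_nodup_keys (P : List (Int × Int)) (d : PySem.Dict Int (PySem.Set Int))
    (hd : d.keys.Nodup) : (P.foldl pvAdjStep d).keys.Nodup := by
  induction P generalizing d with
  | nil => exact hd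
  | cons p P ih => exact ih _ (PySem.Dict.nodup_keys_insert _ _ _ (PySem.Dict.nodup_keys_insert _ _ _ hd))

theorem pvFoldIns_mem_keys (l : List Int) (d : PySem.Dict Int (PySem.Set Int)) (x : Int) :
    x ∈ (l.foldl (fun d i => d.insert i PySem.Set.empty) d).keys ↔ x ∈ d.keys ∨ x ∈ l := by
  induction l generalizing d with
  | nil => simp
  | cons i l ih =>
    simp only [List.foldl_cons, ih, PySem.Dict.mem_keys_insert, List.mem_cons]
    tauto

-- ===== the DFS loop =====

def pvPhi (adj : PySem.Dict Int (PySem.Set Int)) (visited : PySem.Set Int) (stack : List Int) : Nat :=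
  stack.length +
    ((adj.keys.filter (fun v => !(decide (v ∈ visited)))).map
      (fun v => 1 + (adj.getD v PySem.Set.empty).length)).sum

theorem pvSum_filter_drop (l : List Int) (v : Int) (g : Int → Nat) (p : Int → Bool)
    (hl : l.Nodup) (hv : v ∈ l) (hp : p v = true) :
    ((l.filter p).map g).sum =
      g v + ((l.filter (fun x => p x && !(decide (x = v)))).map g).sum := by
  induction l with
  | nil => cases hv
  | cons a l ih =>
    rw [List.nodup_cons] at hl
    rcases List.mem_cons.mp hv with rfl | hv'
    · have h2 : List.filter (fun x => p x && !(decide (x = v))) l = List.filter p l := by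
        apply List.filter_congr
        intro x hx
        have hxv : x ≠ v := fun h => hl.1 (h ▸ hx)
        simp [hxv]
      rw [List.filter_cons_of_pos hp, List.filter_cons_of_neg (by simp [hp]), h2]
      simp
    · have hav : a ≠ v := fun h => hl.1 (h ▸ hv')
      have hrec := ih hl.2 hv'
      by_cases hpa : p a = true
      · rw [List.filter_cons_of_pos hpa, List.filter_cons_of_pos (by simp [hpa, hav])]
        simp only [List.map_cons, List.sum_cons, hrec]
        omega
      · rw [List.filter_cons_of_neg (by simp [hpa]), List.filter_cons_of_neg (by simp [hpa]), hrec]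

theorem pvDfs_spec (adj : PySem.Dict Int (PySem.Set Int))
    (hnk : ∀ a b : Int, b ∈ adj.getD a PySem.Set.empty → b ∈ adj.keys)
    (hnd : adj.keys.Nodup) :
    ∀ (fuel : Nat) (visited : PySem.Set Int) (stack comp : List Int),
    pvPhi adj visited stack ≤ fuel →
    (∀ s ∈ stack, s ∈ adj.keys) →
    ∃ Δ : List Int,
      (pvDfs adj fuel visited stack comp).2 = comp ++ Δ ∧
      (∀ x : Int, x ∈ (pvDfs adj fuel visited stack comp).1 ↔ x ∈ visited ∨ x ∈ Δ) ∧
      (∀ x ∈ Δ, x ∉ visited ∧ ∃ s ∈ stack,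
        Relation.ReflTransGen (fun a b => b ∈ adj.getD a PySem.Set.empty) s x) ∧
      (∀ s ∈ stack, s ∈ (pvDfs adj fuel visited stack comp).1) ∧
      (∀ x ∈ Δ, ∀ y : Int, y ∈ adj.getD x PySem.Set.empty → y ∈ (pvDfs adj fuel visited stack comp).1) := by
  intro fuel
  induction fuel with
  | zero =>
    intro visited stack comp hphi _
    have hs : stack = [] := by
      have : stack.length = 0 := by unfold pvPhi at hphi; omega
      exact List.eq_nil_of_length_eq_zero this
    subst hs
    exact ⟨[], by simp [pvDfs], fun x => by simp [pvDfs], by simp, by simp, by simp⟩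
  | succ f ih =>
    intro visited stack comp hphi hstk
    cases stack with
    | nil =>
      exact ⟨[], by simp [pvDfs], fun x => by simp [pvDfs], by simp, by simp, by simp⟩
    | cons node rest =>
      by_cases hv : node ∈ visited
      · have hred : pvDfs adj (f + 1) visited (node :: rest) comp =
            pvDfs adj f visited rest comp := by simp [pvDfs, hv]
        have hphi' : pvPhi adj visited rest ≤ f := by
          unfold pvPhi at hphi ⊢; simp only [List.length_cons] at hphi; omega
        obtain ⟨Δ, e1, e2, e3, e4, e5⟩ :=
          ih visited rest comp hphi' (fun s hs => hstk s (List.mem_cons_of_mem _ hs))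
        rw [hred]
        refine ⟨Δ, e1, e2, ?_, ?_, e5⟩
        · intro x hx
          obtain ⟨hnv, s, hs, hr⟩ := e3 x hx
          exact ⟨hnv, s, List.mem_cons_of_mem _ hs, hr⟩
        · intro s hs
          rcases List.mem_cons.mp hs with rfl | hs'
          · exact (e2 s).mpr (Or.inl hv)
          · exact e4 s hs'
      · have hred : pvDfs adj (f + 1) visited (node :: rest) comp =
            pvDfs adj f (PySem.Set.add visited node)
              (adj.getD node PySem.Set.empty ++ rest) (comp ++ [node]) := by
          simp [pvDfs, hv]
        have hnodek : node ∈ adj.keys := hstk node List.mem_cons_self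
        -- potential accounting: the new potential is the old one minus 2
        have hsum := pvSum_filter_drop adj.keys node
          (fun v => 1 + (adj.getD v PySem.Set.empty).length)
          (fun v => !(decide (v ∈ visited))) hnd hnodek (by simp [hv])
        beta_reduce at hsum
        have hfe : adj.keys.filter (fun v => !(decide (v ∈ PySem.Set.add visited node))) =
            adj.keys.filter (fun x => !(decide (x ∈ visited)) && !(decide (x = node))) := by
          apply List.filter_congr
          intro x _
          simp [PySem.Set.mem_add]
        have hphi' : pvPhi adj (PySem.Set.add visited node)
            (adj.getD node PySem.Set.empty ++ rest) ≤ f := by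
          unfold pvPhi at hphi ⊢
          rw [hfe]
          simp only [List.length_cons, List.length_append] at hphi ⊢
          omega
        have hstk' : ∀ s ∈ adj.getD node PySem.Set.empty ++ rest, s ∈ adj.keys := by
          intro s hs
          rcases List.mem_append.mp hs with hs' | hs'
          · exact hnk node s hs'
          · exact hstk s (List.mem_cons_of_mem _ hs')
        obtain ⟨Δ, e1, e2, e3, e4, e5⟩ :=
          ih (PySem.Set.add visited node) (adj.getD node PySem.Set.empty ++ rest)
            (comp ++ [node]) hphi' hstk'
        rw [hred]
        refine ⟨node :: Δ, ?_, ?_, ?_, ?_, ?_⟩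
        · rw [e1]; simp
        · intro x
          rw [e2 x, PySem.Set.mem_add]
          simp only [List.mem_cons]
          tauto
        · intro x hx
          rcases List.mem_cons.mp hx with rfl | hx'
          · exact ⟨hv, x, List.mem_cons_self, .refl⟩
          · obtain ⟨hnv, s, hs, hr⟩ := e3 x hx'
            have hxnv : x ∉ visited := fun h => hnv ((PySem.Set.mem_add _ _ _).mpr (Or.inl h))
            rcases List.mem_append.mp hs with hs' | hs'
            · exact ⟨hxnv, node, List.mem_cons_self, Relation.ReflTransGen.head hs' hr⟩
            · exact ⟨hxnv, s, List.mem_cons_of_mem _ hs', hr⟩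
        · intro s hs
          rcases List.mem_cons.mp hs with rfl | hs'
          · exact (e2 s).mpr (Or.inl ((PySem.Set.mem_add _ _ _).mpr (Or.inr rfl)))
          · exact e4 s (List.mem_append_right _ hs')
        · intro x hx y hy
          rcases List.mem_cons.mp hx with rfl | hx'
          · exact e4 y (List.mem_append_left _ hy)
          · exact e5 x hx' y hy

-- ===== the outer loop over starts =====

def pvInv (pairs : List (Int × Int)) (st : PySem.Set Int × PySem.Dict Int Int) : Prop :=
  (∀ v ∈ st.1, ∀ y, pvE pairs v y → y ∈ st.1) ∧
  (∀ i ∈ st.1, pvIsMin pairs i (st.2.getD i 0))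

theorem pvClusters_getD (Δ : List Int) (c : PySem.Dict Int Int) (L i : Int) :
    (Δ.foldl (fun c node => c.insert node L) c).getD i 0 =
      if i ∈ Δ then L else c.getD i 0 := by
  induction Δ generalizing c with
  | nil => simp
  | cons a Δ ih =>
    simp only [List.foldl_cons, ih, PySem.Dict.getD_insert, List.mem_cons]
    by_cases h1 : i ∈ Δ <;> by_cases h2 : i = a <;> simp [h1, h2]

theorem pvSum_filter_le (l : List Int) (p : Int → Bool) (g : Int → Nat) :
    ((l.filter p).map g).sum ≤ (l.map g).sum := by
  induction l with
  | nil => simp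
  | cons a l ih =>
    by_cases hpa : p a = true
    · rw [List.filter_cons_of_pos hpa]; simp only [List.map_cons, List.sum_cons]; omega
    · rw [List.filter_cons_of_neg (by simp [hpa])]; simp only [List.map_cons, List.sum_cons]; omega

theorem pvPhi_le_fuel (adj : PySem.Dict Int (PySem.Set Int)) (hnd : adj.keys.Nodup)
    (V : PySem.Set Int) (s : Int) : pvPhi adj V [s] ≤ pvDfsFuel adj := by
  unfold pvPhi pvDfsFuel
  have h2 : adj.keys.map (fun v => 1 + (adj.getD v PySem.Set.empty).length) =
      adj.items.map (fun kv => 1 + kv.2.length) := by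
    simp only [PySem.Dict.keys, List.map_map]
    apply List.map_congr_left
    intro kv hkv
    have hkv2 : adj.getD kv.1 PySem.Set.empty = kv.2 :=
      PySem.Dict.getD_of_mem_items adj (by simpa using hkv) hnd _
    simp only [Function.comp_apply]
    rw [hkv2]
  have h1 := pvSum_filter_le adj.keys (fun v => !(decide (v ∈ V)))
    (fun v => 1 + (adj.getD v PySem.Set.empty).length)
  rw [h2] at h1
  simp only [List.length_cons, List.length_nil]
  omega

theorem pvStep_spec (pairs : List (Int × Int)) (adj : PySem.Dict Int (PySem.Set Int))
    (hmem : ∀ x y : Int, y ∈ adj.getD x PySem.Set.empty ↔ pvE pairs x y)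
    (hnd : adj.keys.Nodup)
    (hnk : ∀ a b : Int, b ∈ adj.getD a PySem.Set.empty → b ∈ adj.keys)
    (st : PySem.Set Int × PySem.Dict Int Int) (start : Int)
    (hstart : start ∈ adj.keys) (hinv : pvInv pairs st) :
    pvInv pairs (pvClusterStep adj st start) ∧
    (∀ x ∈ st.1, x ∈ (pvClusterStep adj st start).1) ∧
    start ∈ (pvClusterStep adj st start).1 := by
  by_cases hsv : start ∈ st.1
  · simp only [pvClusterStep, if_pos hsv]
    exact ⟨hinv, fun x hx => hx, hsv⟩
  · obtain ⟨Δ, e1, e2, e3, e4, e5⟩ := pvDfs_spec adj hnk hnd (pvDfsFuel adj) st.1 [start] []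
      (pvPhi_le_fuel adj hnd st.1 start)
      (by intro s hs; rw [List.mem_singleton] at hs; subst hs; exact hstart)
    rw [List.nil_append] at e1
    have hconv : ∀ a b : Int,
        Relation.ReflTransGen (fun a b => b ∈ adj.getD a PySem.Set.empty) a b → pvConn pairs a b :=
      fun a b h => Relation.ReflTransGen.mono (fun u v h' => (hmem u v).mp h') h
    have hΔconn : ∀ x ∈ Δ, pvConn pairs start x := by
      intro x hx
      obtain ⟨-, s, hs, hr⟩ := e3 x hx
      rw [List.mem_singleton] at hs
      subst hs
      exact hconv _ _ hr
    have hΔnv : ∀ x ∈ Δ, x ∉ st.1 := fun x hx => (e3 x hx).1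
    have hstartV' : start ∈ (pvDfs adj (pvDfsFuel adj) st.1 [start] []).1 :=
      e4 start List.mem_cons_self
    have hclassV' : ∀ z, pvConn pairs start z →
        z ∈ (pvDfs adj (pvDfsFuel adj) st.1 [start] []).1 := by
      intro z hz
      induction hz with
      | refl => exact hstartV'
      | tail _ hE ihz =>
        rcases (e2 _).mp ihz with hin | hin
        · exact (e2 _).mpr (Or.inl (hinv.1 _ hin _ hE))
        · exact e5 _ hin _ ((hmem _ _).mpr hE)
    have hdisj : ∀ z, pvConn pairs start z → z ∉ st.1 := by
      intro z hz hzin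
      exact hsv (pvClosed_conn hinv.1 hzin (pvConn_symm hz))
    have hΔclass : ∀ z, pvConn pairs start z → z ∈ Δ := by
      intro z hz
      rcases (e2 z).mp (hclassV' z hz) with hin | hin
      · exact absurd hin (hdisj z hz)
      · exact hin
    have hstartΔ : start ∈ Δ := hΔclass start .refl
    obtain ⟨m, hm⟩ : ∃ m, PySem.List.min? ((pvDfs adj (pvDfsFuel adj) st.1 [start] []).2)
        (fun x => x) = some m := by
      cases h : PySem.List.min? ((pvDfs adj (pvDfsFuel adj) st.1 [start] []).2) (fun x => x) with
      | none =>
        rw [PySem.List.min?_eq_none_iff, e1] at h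
        rw [h] at hstartΔ; cases hstartΔ
      | some m => exact ⟨m, rfl⟩
    have hmΔ : m ∈ Δ := by have := PySem.List.min?_mem hm; rwa [e1] at this
    have hmle : ∀ y ∈ Δ, m ≤ y := by
      intro y hy
      have := PySem.List.min?_isMin hm y (by rw [e1]; exact hy)
      exact this
    have hIsMin : ∀ x ∈ Δ, pvIsMin pairs x m := by
      intro x hx
      refine ⟨(pvConn_symm (hΔconn x hx)).trans (hΔconn m hmΔ), ?_⟩
      intro y hy
      exact hmle y (hΔclass y ((hΔconn x hx).trans hy))
    have hstep : pvClusterStep adj st start =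
        ((pvDfs adj (pvDfsFuel adj) st.1 [start] []).1,
         ((pvDfs adj (pvDfsFuel adj) st.1 [start] []).2).foldl
           (fun c node => c.insert node m) st.2) := by
      simp only [pvClusterStep, if_neg hsv, hm, Option.getD_some]
    rw [hstep]
    refine ⟨⟨?_, ?_⟩, ?_, ?_⟩
    · intro v hv y hE
      rcases (e2 v).mp hv with hin | hin
      · exact (e2 y).mpr (Or.inl (hinv.1 _ hin _ hE))
      · exact e5 _ hin _ ((hmem _ _).mpr hE)
    · intro i hi
      rw [e1, pvClusters_getD]
      rcases (e2 i).mp hi with hin | hin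
      · rw [if_neg (fun h => hΔnv i h hin)]
        exact hinv.2 i hin
      · rw [if_pos hin]
        exact hIsMin i hin
    · intro x hx
      exact (e2 x).mpr (Or.inl hx)
    · exact hstartV'

theorem pvOuter_fold (pairs : List (Int × Int)) (adj : PySem.Dict Int (PySem.Set Int))
    (hmem : ∀ x y : Int, y ∈ adj.getD x PySem.Set.empty ↔ pvE pairs x y)
    (hnd : adj.keys.Nodup)
    (hnk : ∀ a b : Int, b ∈ adj.getD a PySem.Set.empty → b ∈ adj.keys) :
    ∀ (l : List Int) (st : PySem.Set Int × PySem.Dict Int Int),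
      (∀ i ∈ l, i ∈ adj.keys) → pvInv pairs st →
      pvInv pairs (l.foldl (pvClusterStep adj) st) ∧
      (∀ x ∈ st.1, x ∈ (l.foldl (pvClusterStep adj) st).1) ∧
      (∀ i ∈ l, i ∈ (l.foldl (pvClusterStep adj) st).1) := by
  intro l
  induction l with
  | nil => intro st _ hinv; exact ⟨hinv, fun x hx => hx, by simp⟩
  | cons start l ih =>
    intro st hl hinv
    obtain ⟨S1, S2, S3⟩ := pvStep_spec pairs adj hmem hnd hnk st start
      (hl start List.mem_cons_self) hinv
    obtain ⟨H1, H2, H3⟩ := ih (pvClusterStep adj st start)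
      (fun i hi => hl i (List.mem_cons_of_mem _ hi)) S1
    rw [List.foldl_cons]
    refine ⟨H1, fun x hx => H2 x (S2 x hx), ?_⟩
    intro i hi
    rcases List.mem_cons.mp hi with rfl | hi'
    · exact H2 i S3
    · exact H3 i hi'

-- ===== union-find =====

def pvPInv (P : List (Int × Int)) (n : Int) (d : PySem.Dict Int Int) : Prop :=
  ∀ x : Int, 0 ≤ x → x < n →
    (0 ≤ d.getD x x ∧ d.getD x x < n ∧ d.getD x x ≤ x ∧ pvConn P x (d.getD x x)) ∧
    pvIsMin P x (pvFind d (n.toNat + 1) x)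

theorem pvFind_spec (n : Int) (d : PySem.Dict Int Int) (P : List (Int × Int))
    (hK : ∀ x : Int, 0 ≤ x → x < n →
      0 ≤ d.getD x x ∧ d.getD x x < n ∧ d.getD x x ≤ x ∧ pvConn P x (d.getD x x)) :
    ∀ (fuel : Nat) (x : Int), 0 ≤ x → x < n → x.toNat < fuel →
      (0 ≤ pvFind d fuel x ∧ pvFind d fuel x < n ∧ pvFind d fuel x ≤ x ∧
        d.getD (pvFind d fuel x) (pvFind d fuel x) = pvFind d fuel x ∧
        pvConn P x (pvFind d fuel x)) ∧
      (∀ fuel' : Nat, x.toNat < fuel' → pvFind d fuel' x = pvFind d fuel x) := by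
  intro fuel
  induction fuel with
  | zero => intro x _ _ h; omega
  | succ f ih =>
    intro x hx0 hxn hf
    obtain ⟨h0, h1, h2, hc⟩ := hK x hx0 hxn
    by_cases hyx : d.getD x x = x
    · have hfx : pvFind d (f + 1) x = x := by simp [pvFind, hyx]
      refine ⟨?_, ?_⟩
      · rw [hfx]; exact ⟨hx0, hxn, le_rfl, hyx, .refl⟩
      · intro fuel' hx'
        cases fuel' with
        | zero => omega
        | succ f' => simp [pvFind, hyx]
    · have hlt : d.getD x x < x := lt_of_le_of_ne h2 hyx
      have hstep : pvFind d (f + 1) x = pvFind d f (d.getD x x) := by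
        simp [pvFind, hyx]
      have hyf : (d.getD x x).toNat < f := by omega
      have IH := ih (d.getD x x) h0 h1 hyf
      refine ⟨?_, ?_⟩
      · rw [hstep]
        obtain ⟨⟨a1, a2, a3, a4, a5⟩, -⟩ := IH
        exact ⟨a1, a2, le_trans a3 (le_of_lt hlt), a4, hc.trans a5⟩
      · intro fuel' hx'
        cases fuel' with
        | zero => omega
        | succ f' =>
          have hst' : pvFind d (f' + 1) x = pvFind d f' (d.getD x x) := by
            simp [pvFind, hyx]
          rw [hst', hstep, IH.2 f' (by omega)]

theorem pvFind_fix (d : PySem.Dict Int Int) (r : Int) (h : d.getD r r = r) (f : Nat) :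
    pvFind d (f + 1) r = r := by
  simp [pvFind, h]

theorem pvUf_union (P : List (Int × Int)) (n : Int) (d : PySem.Dict Int Int)
    (hinv : pvPInv P n d) (a b : Int)
    (ha0 : 0 ≤ a) (han : a < n) (hb0 : 0 ≤ b) (hbn : b < n)
    (q : Int × Int) (hq : q = (a, b) ∨ q = (b, a))
    (hlt : pvFind d (n.toNat + 1) a < pvFind d (n.toNat + 1) b) :
    pvPInv (P ++ [q]) n (d.insert (pvFind d (n.toNat + 1) b) (pvFind d (n.toNat + 1) a)) := by
  have hK : ∀ x : Int, 0 ≤ x → x < n →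
      0 ≤ d.getD x x ∧ d.getD x x < n ∧ d.getD x x ≤ x ∧ pvConn P x (d.getD x x) :=
    fun x h1 h2 => (hinv x h1 h2).1
  obtain ⟨⟨ra0, ran, ralea, rafix, raconn⟩, -⟩ :=
    pvFind_spec n d P hK (n.toNat + 1) a ha0 han (by omega)
  obtain ⟨⟨rb0, rbn, rbleb, rbfix, rbconn⟩, -⟩ :=
    pvFind_spec n d P hK (n.toNat + 1) b hb0 hbn (by omega)
  have hMa : pvIsMin P a (pvFind d (n.toNat + 1) a) := (hinv a ha0 han).2
  have hMb : pvIsMin P b (pvFind d (n.toNat + 1) b) := (hinv b hb0 hbn).2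
  have hne : pvFind d (n.toNat + 1) a ≠ pvFind d (n.toNat + 1) b := ne_of_lt hlt
  have hEq : pvE (P ++ [q]) a b := by
    rcases hq with rfl | rfl
    · exact Or.inl (List.mem_append_right _ (List.mem_singleton.mpr rfl))
    · exact Or.inr (List.mem_append_right _ (List.mem_singleton.mpr rfl))
  have hK1' : ∀ x : Int, 0 ≤ x → x < n →
      0 ≤ (d.insert (pvFind d (n.toNat + 1) b) (pvFind d (n.toNat + 1) a)).getD x x ∧
      (d.insert (pvFind d (n.toNat + 1) b) (pvFind d (n.toNat + 1) a)).getD x x < n ∧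
      (d.insert (pvFind d (n.toNat + 1) b) (pvFind d (n.toNat + 1) a)).getD x x ≤ x ∧
      pvConn (P ++ [q]) x
        ((d.insert (pvFind d (n.toNat + 1) b) (pvFind d (n.toNat + 1) a)).getD x x) := by
    intro x h1 h2
    rw [PySem.Dict.getD_insert]
    by_cases hxrb : x = pvFind d (n.toNat + 1) b
    · rw [if_pos hxrb]
      subst hxrb
      refine ⟨ra0, ran, le_of_lt hlt, ?_⟩
      exact (pvConn_mono (pvConn_symm rbconn)).trans
        ((pvConn_single (pvE_symm hEq)).trans (pvConn_mono raconn))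
    · rw [if_neg hxrb]
      obtain ⟨k1, k2, k3, k4⟩ := hK x h1 h2
      exact ⟨k1, k2, k3, pvConn_mono k4⟩
  have hdec : ∀ u v : Int, pvConn (P ++ [q]) u v →
      pvConn P u v ∨ (pvConn P u a ∧ pvConn P b v) ∨ (pvConn P u b ∧ pvConn P a v) := by
    intro u v h
    rcases hq with rfl | rfl
    · exact pvConn_append_one h
    · rcases pvConn_append_one h with h' | ⟨h1, h2⟩ | ⟨h1, h2⟩
      · exact Or.inl h'
      · exact Or.inr (Or.inr ⟨h1, h2⟩)
      · exact Or.inr (Or.inl ⟨h1, h2⟩)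
  intro x hx0 hxn
  refine ⟨hK1' x hx0 hxn, ?_⟩
  obtain ⟨⟨r0', rn', -, rfix', rconn'⟩, -⟩ :=
    pvFind_spec n (d.insert (pvFind d (n.toNat + 1) b) (pvFind d (n.toNat + 1) a))
      (P ++ [q]) hK1' (n.toNat + 1) x hx0 hxn (by omega)
  have hfixmin : ∀ s : Int, 0 ≤ s → s < n →
      (d.insert (pvFind d (n.toNat + 1) b) (pvFind d (n.toNat + 1) a)).getD s s = s →
      s ≠ pvFind d (n.toNat + 1) b ∧ pvIsMin P s s := by
    intro s h1 h2 hfix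
    have hsrb : s ≠ pvFind d (n.toNat + 1) b := by
      intro h
      rw [PySem.Dict.getD_insert, if_pos h] at hfix
      exact hne (hfix.symm ▸ h ▸ rfl)
    rw [PySem.Dict.getD_insert, if_neg hsrb] at hfix
    have hself : pvFind d (n.toNat + 1) s = s := pvFind_fix d s hfix n.toNat
    have hmin := (hinv s h1 h2).2
    rw [hself] at hmin
    exact ⟨hsrb, hmin⟩
  obtain ⟨hr'rb, hr'min⟩ := hfixmin _ r0' rn' rfix'
  by_cases htch : pvConn P x a ∨ pvConn P x b
  · have hr'conn : pvConn P (pvFind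
        (d.insert (pvFind d (n.toNat + 1) b) (pvFind d (n.toNat + 1) a)) (n.toNat + 1) x) a ∨
        pvConn P (pvFind
        (d.insert (pvFind d (n.toNat + 1) b) (pvFind d (n.toNat + 1) a)) (n.toNat + 1) x) b := by
      rcases hdec x _ rconn' with h' | ⟨h1, h2⟩ | ⟨h1, h2⟩
      · rcases htch with ht | ht
        · exact Or.inl ((pvConn_symm h').trans ht)
        · exact Or.inr ((pvConn_symm h').trans ht)
      · exact Or.inr (pvConn_symm h2)
      · exact Or.inl (pvConn_symm h2)
    have hr'ra : pvFind
        (d.insert (pvFind d (n.toNat + 1) b) (pvFind d (n.toNat + 1) a)) (n.toNat + 1) x =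
        pvFind d (n.toNat + 1) a := by
      rcases hr'conn with hca | hcb
      · exact pvIsMin_unique (pvIsMin_congr hca hr'min) hMa
      · exact absurd (pvIsMin_unique (pvIsMin_congr hcb hr'min) hMb) hr'rb
    rw [hr'ra] at rconn' ⊢
    refine ⟨rconn', ?_⟩
    intro y hy
    rcases hdec x y hy with h' | ⟨h1, h2⟩ | ⟨h1, h2⟩
    · rcases htch with ht | ht
      · exact hMa.2 y ((pvConn_symm ht).trans h')
      · exact le_of_lt (lt_of_lt_of_le hlt (hMb.2 y ((pvConn_symm ht).trans h')))
    · exact le_of_lt (lt_of_lt_of_le hlt (hMb.2 y h2))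
    · exact hMa.2 y h2
  · rw [not_or] at htch
    have hxr' : pvConn P x (pvFind
        (d.insert (pvFind d (n.toNat + 1) b) (pvFind d (n.toNat + 1) a)) (n.toNat + 1) x) := by
      rcases hdec x _ rconn' with h' | ⟨h1, h2⟩ | ⟨h1, h2⟩
      · exact h'
      · exact absurd h1 htch.1
      · exact absurd h1 htch.2
    refine ⟨rconn', ?_⟩
    intro y hy
    rcases hdec x y hy with h' | ⟨h1, h2⟩ | ⟨h1, h2⟩
    · exact (pvIsMin_congr (pvConn_symm hxr') hr'min).2 y h'
    · exact absurd h1 htch.1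
    · exact absurd h1 htch.2

theorem pvUf_step (P : List (Int × Int)) (n : Int) (d : PySem.Dict Int Int)
    (hinv : pvPInv P n d) (p : Int × Int)
    (hp : 0 ≤ p.1 ∧ p.1 < n ∧ 0 ≤ p.2 ∧ p.2 < n) :
    pvPInv (P ++ [p]) n (pvUfStep (n.toNat + 1) d p) := by
  obtain ⟨h10, h1n, h20, h2n⟩ := hp
  have hK : ∀ x : Int, 0 ≤ x → x < n →
      0 ≤ d.getD x x ∧ d.getD x x < n ∧ d.getD x x ≤ x ∧ pvConn P x (d.getD x x) :=
    fun x hx1 hx2 => (hinv x hx1 hx2).1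
  simp only [pvUfStep]
  by_cases hlt : pvFind d (n.toNat + 1) p.1 < pvFind d (n.toNat + 1) p.2
  · rw [if_pos hlt]
    exact pvUf_union P n d hinv p.1 p.2 h10 h1n h20 h2n p (Or.inl Prod.mk.eta.symm) hlt
  · rw [if_neg hlt]
    by_cases hgt : pvFind d (n.toNat + 1) p.2 < pvFind d (n.toNat + 1) p.1
    · rw [if_pos hgt]
      exact pvUf_union P n d hinv p.2 p.1 h20 h2n h10 h1n p (Or.inr Prod.mk.eta.symm) hgt
    · rw [if_neg hgt]
      have heq : pvFind d (n.toNat + 1) p.1 = pvFind d (n.toNat + 1) p.2 :=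
        le_antisymm (le_of_not_gt hgt) (le_of_not_gt hlt)
      obtain ⟨⟨-, -, -, -, c1⟩, -⟩ := pvFind_spec n d P hK (n.toNat + 1) p.1 h10 h1n (by omega)
      obtain ⟨⟨-, -, -, -, c2⟩, -⟩ := pvFind_spec n d P hK (n.toNat + 1) p.2 h20 h2n (by omega)
      have hconnij : pvConn P p.1 p.2 := by
        rw [heq] at c1
        exact c1.trans (pvConn_symm c2)
      intro x hx0 hxn
      obtain ⟨⟨k1, k2, k3, k4⟩, ⟨hc, hb⟩⟩ := hinv x hx0 hxn
      refine ⟨⟨k1, k2, k3, pvConn_mono k4⟩, pvConn_mono hc, ?_⟩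
      intro y hy
      rcases pvConn_append_one hy with h' | ⟨h1', h2'⟩ | ⟨h1', h2'⟩
      · exact hb y h'
      · exact hb y (h1'.trans (hconnij.trans h2'))
      · exact hb y (h1'.trans ((pvConn_symm hconnij).trans h2'))

theorem pvUf_fold (n : Int) :
    ∀ (l : List (Int × Int)) (P : List (Int × Int)) (d : PySem.Dict Int Int),
      (∀ p ∈ l, 0 ≤ p.1 ∧ p.1 < n ∧ 0 ≤ p.2 ∧ p.2 < n) →
      pvPInv P n d → pvPInv (P ++ l) n (l.foldl (pvUfStep (n.toNat + 1)) d) := by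
  intro l
  induction l with
  | nil => intro P d _ h; simpa using h
  | cons p l ih =>
    intro P d hl h
    have h1 := pvUf_step P n d h p (hl p (List.mem_cons_self))
    have h2 := ih (P ++ [p]) _ (fun q hq => hl q (List.mem_cons_of_mem _ hq)) h1
    simpa using h2

theorem pvParent0_getD (l : List Int) (d : PySem.Dict Int Int)
    (hd : ∀ x, d.getD x x = x) (x : Int) :
    (l.foldl (fun d i => d.insert i i) d).getD x x = x := by
  induction l generalizing d with
  | nil => exact hd x
  | cons i l ih =>
    refine ih _ (fun z => ?_)
    rw [PySem.Dict.getD_insert]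
    split <;> simp_all

-- ===== glue =====

theorem pvFoldIns_nodup (l : List Int) (d : PySem.Dict Int (PySem.Set Int))
    (hd : d.keys.Nodup) : (l.foldl (fun d i => d.insert i PySem.Set.empty) d).keys.Nodup := by
  induction l generalizing d with
  | nil => exact hd
  | cons i l ih => exact ih _ (PySem.Dict.nodup_keys_insert _ _ _ hd)

theorem cluster_duplicates_eq (pairs : List (Int × Int)) (n_items : Int)
    (hpre : Pre_cluster_duplicates pairs n_items) :
    cluster_duplicates pairs n_items = cluster_duplicates_alt pairs n_items := by
  unfold cluster_duplicates cluster_duplicates_alt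
  apply List.map_congr_left
  intro i hi
  have hirange : 0 ≤ i ∧ i < n_items := PySem.List.mem_pyRange_one.mp hi
  -- A side: the final clusters map every item in range to its component minimum
  have hadj0 : ∀ x : Int, ((PySem.List.pyRange 0 n_items).foldl
      (fun d i => d.insert i PySem.Set.empty) PySem.Dict.empty).getD x PySem.Set.empty =
      PySem.Set.empty :=
    pvAdj0_getD _ _ (fun x => PySem.Dict.getD_empty x PySem.Set.empty)
  have hmem : ∀ x y : Int,
      y ∈ (pairs.foldl pvAdjStep ((PySem.List.pyRange 0 n_items).foldl
        (fun d i => d.insert i PySem.Set.empty) PySem.Dict.empty)).getD x PySem.Set.empty ↔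
      pvE pairs x y := by
    intro x y
    rw [pvAdj_getD_mem, hadj0 x]
    simp [PySem.Set.empty]
  have hnd : (pairs.foldl pvAdjStep ((PySem.List.pyRange 0 n_items).foldl
      (fun d i => d.insert i PySem.Set.empty) PySem.Dict.empty)).keys.Nodup :=
    pvAdj_nodup_keys _ _ (pvFoldIns_nodup _ _ (by simp [PySem.Dict.keys_empty]))
  have hnk : ∀ a b : Int,
      b ∈ (pairs.foldl pvAdjStep ((PySem.List.pyRange 0 n_items).foldl
        (fun d i => d.insert i PySem.Set.empty) PySem.Dict.empty)).getD a PySem.Set.empty →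
      b ∈ (pairs.foldl pvAdjStep ((PySem.List.pyRange 0 n_items).foldl
        (fun d i => d.insert i PySem.Set.empty) PySem.Dict.empty)).keys := by
    intro a b hb
    rw [pvAdj_mem_keys]
    rcases (hmem a b).mp hb with h | h
    · exact Or.inr ⟨(a, b), h, Or.inr rfl⟩
    · exact Or.inr ⟨(b, a), h, Or.inl rfl⟩
  have hkeys : ∀ j ∈ PySem.List.pyRange 0 n_items,
      j ∈ (pairs.foldl pvAdjStep ((PySem.List.pyRange 0 n_items).foldl
        (fun d i => d.insert i PySem.Set.empty) PySem.Dict.empty)).keys := by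
    intro j hj
    rw [pvAdj_mem_keys, pvFoldIns_mem_keys]
    exact Or.inl (Or.inr hj)
  obtain ⟨H1, -, H3⟩ := pvOuter_fold pairs _ hmem hnd hnk (PySem.List.pyRange 0 n_items)
    ((PySem.Set.empty : PySem.Set Int), (PySem.Dict.empty : PySem.Dict Int Int))
    hkeys ⟨fun v hv => absurd hv (List.not_mem_nil), fun j hj => absurd hj (List.not_mem_nil)⟩
  have hA := H1.2 i (H3 i hi)
  -- B side: union-find roots are the component minima
  have hp0 : ∀ x : Int, ((PySem.List.pyRange 0 n_items).foldl
      (fun d i => d.insert i i) PySem.Dict.empty).getD x x = x :=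
    pvParent0_getD _ _ (fun x => PySem.Dict.getD_empty x x)
  have hbase : pvPInv [] n_items ((PySem.List.pyRange 0 n_items).foldl
      (fun d i => d.insert i i) PySem.Dict.empty) := by
    intro x hx0 hxn
    rw [hp0 x]
    refine ⟨⟨hx0, hxn, le_rfl, .refl⟩, ?_⟩
    rw [pvFind_fix _ x (hp0 x) n_items.toNat]
    exact ⟨.refl, fun y hy => le_of_eq (pvConn_nil hy)⟩
  have hfold := pvUf_fold n_items pairs [] _ (fun p hp => hpre p hp) hbase
  rw [List.nil_append] at hfold
  have hB := (hfold i hirange.1 hirange.2).2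
  exact congrArg (fun v => (i, v)) (pvIsMin_unique hA hB)

-- ===== VERDICT (by name: the statement is the Claim_ definition above) =====
theorem cluster_duplicates_spec : Claim_equal_cluster_duplicates := by
  intro pairs n_items _ hpre
  exact cluster_duplicates_eq pairs n_items hpre
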